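-- pv_equiv track=rewrite | github.com/tertiadecima/Iliushchenko-python-course-2023 | tasks/advanced/Илющенко - task9.py | sliding_2
-- ===== SOURCE A (Python) =====
-- def sliding_2(iterator, n, step):
--     assert n >= step, "Block size should be greater than step size"
--     iterator_block = iter(iterator)
--
--     block = []
--     for _ in range(n):
--         try:
--             block.append(next(iterator_block))
--         except StopIteration:
--             return
--     yield block
--     while True:
--         rest = block[n - step + 1:]
--         for _ in range(n - len(rest)):
--             try:
--                 rest.append(next(iterator_block))
--             except StopIteration:
--                 return
--         yield rest
--         block = rest
-- ===== SOURCE B (Python) =====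
-- def sliding_2(iterator, n, step):
--     assert n >= step, "Block size should be greater than step size"
--     stride = n - step + 1
--     buffer = []
--     for x in iterator:
--         buffer.append(x)
--         if len(buffer) == n:
--             yield list(buffer)
--             del buffer[:stride]
-- ===== Notes on version B (the rewrite author's own statement) =====
-- stated objective: simpler
-- what changed: Replaced A's nested outer-while with per-block slice-and-refill inner loops by one flat element-by-element pass over the iterator that appends to a buffer and, whenever the buffer reaches length n, yields a copy and deletes the first n-step+1 elements.
import Mathlib
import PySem

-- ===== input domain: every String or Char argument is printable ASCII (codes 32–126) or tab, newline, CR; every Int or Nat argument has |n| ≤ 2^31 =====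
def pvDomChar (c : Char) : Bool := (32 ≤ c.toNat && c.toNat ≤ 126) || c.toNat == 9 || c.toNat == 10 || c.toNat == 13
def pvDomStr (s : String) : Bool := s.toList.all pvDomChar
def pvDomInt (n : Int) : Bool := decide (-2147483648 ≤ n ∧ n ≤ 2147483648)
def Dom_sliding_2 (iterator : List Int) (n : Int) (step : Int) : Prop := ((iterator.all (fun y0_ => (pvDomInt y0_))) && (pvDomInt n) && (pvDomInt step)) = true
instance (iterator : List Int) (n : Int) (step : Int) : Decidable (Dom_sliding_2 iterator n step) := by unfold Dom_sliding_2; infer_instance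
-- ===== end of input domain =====

-- B replaces A's nested outer-while with per-block slice/refill loops by one flat fold over the
-- elements (append to a buffer; emit a copy and trim when it reaches length n) — objective: simpler.
-- A yields live internal lists; this equivalence is about the returned values only.


-- ===== PORT A =====
-- A-side helper: the 'for _ in range(k): xs.append(next(it))' refill loop; none = StopIteration hit (A returns)
def pyFill (k : Nat) (acc rem : List Int) : Option (List Int × List Int) :=
  match k, rem with
  | 0, rem => some (acc, rem)
  | _ + 1, [] => none
  | k + 1, x :: rem => pyFill k (acc ++ [x]) rem

-- A-side helper: the 'while True' loop; fuel only makes it total (inside Pre_ each pass consumes ≥ 1 element)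
def slidingWhile (fuel : Nat) (n step : Int) (block rem : List Int) : List (List Int) :=
  match fuel with
  | 0 => []
  | fuel + 1 =>
    let rest := PySem.List.slice block (some (n - step + 1)) none
    match pyFill (n - (rest.length : Int)).toNat rest rem with
    | none => []
    | some (rest', rem') => rest' :: slidingWhile fuel n step rest' rem'

def sliding_2 (iterator : List Int) (n : Int) (step : Int) : List (List Int) :=
  if n < step then []       -- assert n >= step fails (AssertionError): outside Pre_
  else
    match pyFill n.toNat [] iterator with
    | none => []
    | some (block, rem) => block :: slidingWhile (rem.length + 1) n step block rem

-- ===== PORT B =====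
-- B-side helper: the body of B's for-loop (append; when the buffer reaches n, emit it and delete its first stride elements)
def bufStep (n stride : Int) (st : List Int × List (List Int)) (x : Int) : List Int × List (List Int) :=
  let buf := st.1 ++ [x]
  if (buf.length : Int) == n then (buf.drop stride.toNat, st.2 ++ [buf]) else (buf, st.2)

def sliding_2_alt (iterator : List Int) (n : Int) (step : Int) : List (List Int) :=
  if n < step then []       -- same assert as A
  else
    let stride := n - step + 1
    (iterator.foldl (bufStep n stride) ([], [])).2

-- ===== PRECONDITION & SPEC =====
-- Pre_ excludes n < step, where A raises AssertionError, and n ≤ 0, where A's generator never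
-- terminates (it yields empty blocks forever), so list(A(...)) diverges and returns no value.
def Pre_sliding_2 (iterator : List Int) (n : Int) (step : Int) : Prop := 1 ≤ n ∧ step ≤ n
instance (iterator : List Int) (n : Int) (step : Int) : Decidable (Pre_sliding_2 iterator n step) := by unfold Pre_sliding_2; infer_instance
def pvWitness_sliding_2 : List Int × Int × Int := ([1, 2, 3, 4, 5], 3, 2)

def Spec_sliding_2 (iterator : List Int) (n : Int) (step : Int) (out : List (List Int)) : Prop := out = sliding_2_alt iterator n step
instance (iterator : List Int) (n : Int) (step : Int) (out : List (List Int)) : Decidable (Spec_sliding_2 iterator n step out) := by unfold Spec_sliding_2; infer_instance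

-- ===== CLAIM (what is proved, stated in full; the proofs are below) =====
def Claim_equal_sliding_2 : Prop := ∀ (iterator : List Int) (n : Int) (step : Int), Dom_sliding_2 iterator n step → Pre_sliding_2 iterator n step → Spec_sliding_2 iterator n step (sliding_2 iterator n step)

-- ===== LEMMAS AND PROOFS =====

-- proof-only abbreviation for B's fold started with an empty output accumulator
def bufRun (n s : Int) (buf : List Int) (xs : List Int) : List (List Int) :=
  (xs.foldl (bufStep n s) (buf, [])).2

theorem pyFill_eq (k : Nat) (acc rem : List Int) :
    pyFill k acc rem = if rem.length < k then none else some (acc ++ rem.take k, rem.drop k) := by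
  induction k generalizing acc rem with
  | zero => simp [pyFill]
  | succ k ih =>
    cases rem with
    | nil => simp [pyFill]
    | cons x r => simp [pyFill, ih]

theorem bufRun_out (n s : Int) (xs buf : List Int) (out : List (List Int)) :
    (xs.foldl (bufStep n s) (buf, out)).2 = out ++ bufRun n s buf xs := by
  induction xs generalizing buf out with
  | nil => simp [bufRun]
  | cons x xs ih =>
    simp only [bufRun, List.foldl_cons, bufStep]
    split_ifs <;> rw [ih, ih] <;> simp

theorem bufRun_short (n s : Int) (xs : List Int) :
    ∀ buf : List Int, buf.length + xs.length < n.toNat → bufRun n s buf xs = [] := by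
  induction xs with
  | nil => intro buf h; simp [bufRun]
  | cons x xs ih =>
    intro buf h
    have hlen : buf.length + (xs.length + 1) < n.toNat := by
      simpa using h
    have hne : (((buf ++ [x]).length : Int) == n) = false := by
      simp only [beq_eq_false_iff_ne, ne_eq, List.length_append, List.length_cons, List.length_nil]
      omega
    simp only [bufRun, List.foldl_cons, bufStep, hne, Bool.false_eq_true, if_false]
    have := ih (buf ++ [x]) (by simp only [List.length_append, List.length_cons, List.length_nil]; omega)
    simpa [bufRun] using this

theorem bufRun_emit (n s : Int) (xs : List Int) :
    ∀ buf : List Int, buf.length < n.toNat → n.toNat ≤ buf.length + xs.length →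
    bufRun n s buf xs =
      (buf ++ xs.take (n.toNat - buf.length)) ::
        bufRun n s ((buf ++ xs.take (n.toNat - buf.length)).drop s.toNat)
          (xs.drop (n.toNat - buf.length)) := by
  induction xs with
  | nil => intro buf h1 h2; simp at h2; omega
  | cons x xs ih =>
    intro buf h1 h2
    by_cases hbe : (buf ++ [x]).length = n.toNat
    · have hcond : (((buf ++ [x]).length : Int) == n) = true := by
        simp only [beq_iff_eq]
        simp only [List.length_append, List.length_cons, List.length_nil] at hbe ⊢
        omega
      have hone : n.toNat - buf.length = 1 := by simp at hbe; omega
      simp only [bufRun, List.foldl_cons, bufStep, hcond, if_true, hone]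
      rw [bufRun_out]
      simp [bufRun]
    · have hcond : (((buf ++ [x]).length : Int) == n) = false := by
        simp only [beq_eq_false_iff_ne, ne_eq]
        simp only [List.length_append, List.length_cons, List.length_nil] at hbe ⊢
        omega
      have hlt : (buf ++ [x]).length < n.toNat := by
        simp at hbe ⊢; omega
      obtain ⟨m, hm⟩ : ∃ m, n.toNat - buf.length = m + 1 := ⟨n.toNat - buf.length - 1, by omega⟩
      have hm' : n.toNat - (buf ++ [x]).length = m := by simp; omega
      have := ih (buf ++ [x]) hlt (by simp at h2 ⊢; omega)
      rw [hm'] at this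
      simp only [bufRun, List.foldl_cons, bufStep, hcond, Bool.false_eq_true, if_false]
      simp only [bufRun] at this
      rw [this, hm]
      simp [List.take_succ_cons, List.drop_succ_cons]

theorem slidingWhile_eq (n step : Int) (hn : 1 ≤ n) (hs : step ≤ n) :
    ∀ (l : Nat) (xs : List Int), xs.length = l → ∀ fuel : Nat, ∀ block : List Int,
      block.length = n.toNat → xs.length < fuel →
      slidingWhile fuel n step block xs = bufRun n (n - step + 1) (block.drop (n - step + 1).toNat) xs := by
  intro l
  induction l using Nat.strong_induction_on with
  | _ l IH =>
  intro xs hl fuel block hb hf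
  subst hl
  cases fuel with
  | zero => omega
  | succ fuel =>
    have hslice : PySem.List.slice block (some (n - step + 1)) none = block.drop (n - step + 1).toNat :=
      PySem.List.slice_from _ (by omega)
    set S := (n - step + 1).toNat with hSdef
    have hS : 1 ≤ S := by omega
    set rest := block.drop S with hrest
    have hrl : rest.length = n.toNat - S := by simp [hrest, hb]
    have hK : (n - (rest.length : Int)).toNat = n.toNat - rest.length := by omega
    have hKpos : 1 ≤ n.toNat - rest.length := by omega
    have hfill := pyFill_eq (n - (rest.length : Int)).toNat rest xs
    by_cases hc : xs.length < (n - (rest.length : Int)).toNat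
    · rw [if_pos hc] at hfill
      simp only [slidingWhile, hslice, hfill]
      exact (bufRun_short n (n - step + 1) xs rest (by omega)).symm
    · rw [if_neg hc] at hfill
      rw [hK] at hc
      simp only [slidingWhile, hslice, hfill]
      rw [hK]
      have hemit := bufRun_emit n (n - step + 1) xs rest (by omega) (by omega)
      rw [hemit]
      have hlen' : (rest ++ xs.take (n.toNat - rest.length)).length = n.toNat := by
        simp; omega
      have hxl : (xs.drop (n.toNat - rest.length)).length < xs.length := by
        simp; omega
      rw [IH (xs.drop (n.toNat - rest.length)).length (by simpa using hxl) _ rfl fuel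
        (rest ++ xs.take (n.toNat - rest.length)) hlen' (by simp only [List.length_drop]; omega)]

-- ===== VERDICT (by name: the statement is the Claim_ definition above) =====
theorem sliding_2_spec : Claim_equal_sliding_2 := by
  intro iterator n step _ hpre
  obtain ⟨hn, hs⟩ := hpre
  unfold Spec_sliding_2 sliding_2 sliding_2_alt
  rw [if_neg (by omega), if_neg (by omega)]
  have hB : (iterator.foldl (bufStep n (n - step + 1)) ([], [])).2 = bufRun n (n - step + 1) [] iterator := rfl
  have hfill := pyFill_eq n.toNat [] iterator
  by_cases hc : iterator.length < n.toNat
  · rw [if_pos hc] at hfill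
    simp only [hfill]
    rw [hB, bufRun_short n (n - step + 1) iterator [] (by simp only [List.length_nil]; omega)]
  · rw [if_neg hc] at hfill
    simp only [hfill, List.nil_append]
    rw [hB, bufRun_emit n (n - step + 1) iterator [] (by simp only [List.length_nil]; omega)
      (by simp only [List.length_nil]; omega)]
    simp only [List.nil_append, List.length_nil, Nat.sub_zero]
    congr 1
    exact slidingWhile_eq n step hn hs (iterator.drop n.toNat).length (iterator.drop n.toNat) rfl
      ((iterator.drop n.toNat).length + 1) (iterator.take n.toNat)
      (by simp only [List.length_take]; omega) (by omega)
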